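-- pv_equiv track=rewrite | github.com/pypi-data/pypi-mirror-402 | packages/ensembl-tui/ensembl_tui-0.7.0-py3-none-any.whl/ensembl_tui/_maf.py | _get_alignment_block_indices
-- ===== SOURCE A (Python) =====
-- def _get_alignment_block_indices(data: list[str]) -> list[tuple[int, int]]:
--     blocks = []
--     start = None
--     for i, line in enumerate(data):
--         if line.startswith("a"):
--             if start is not None:
--                 blocks.append((start, i))
--             start = i
--
--     if start is None:
--         return []
--
--     blocks.append((start, i))
--     return blocks
-- ===== SOURCE B (Python) =====
-- def _get_alignment_block_indices(data: list[str]) -> list[tuple[int, int]]: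
--     starts = [i for i, line in enumerate(data) if line.startswith("a")]
--     if not starts:
--         return []
--     return list(zip(starts, starts[1:])) + [(starts[-1], len(data) - 1)]
-- ===== Notes on version B (the rewrite author's own statement) =====
-- stated objective: simpler
-- what changed: Replaces the single mutable-pointer loop (blocks list + start sentinel carried across iterations) with a two-phase collect-then-pair structure: gather all 'a'-line indices, pair consecutive ones with zip, and append the final (last_start, len-1) block.
import Mathlib
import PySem

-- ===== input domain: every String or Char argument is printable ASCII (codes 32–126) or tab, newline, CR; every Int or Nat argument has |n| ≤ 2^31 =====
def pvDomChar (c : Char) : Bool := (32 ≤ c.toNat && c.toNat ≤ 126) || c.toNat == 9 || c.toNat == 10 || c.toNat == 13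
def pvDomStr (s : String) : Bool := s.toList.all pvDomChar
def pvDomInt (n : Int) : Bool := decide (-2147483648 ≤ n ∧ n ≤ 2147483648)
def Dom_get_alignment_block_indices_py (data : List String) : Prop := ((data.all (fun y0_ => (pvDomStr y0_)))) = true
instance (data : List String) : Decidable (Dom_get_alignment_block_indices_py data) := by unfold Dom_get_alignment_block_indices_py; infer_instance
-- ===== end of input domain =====

-- B replaces A's single mutable-pointer pass with collect-the-start-indices then pair-consecutive (zip): same O(n) cost, plainer structure.


-- ===== PORT A =====
-- A's loop: state (blocks, start); final append uses the last loop index i = data.length - 1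
-- (reached only when start ≠ none, hence data ≠ []).
def pvStepA (acc : List (Int × Int) × Option Int) (p : Int × String) : List (Int × Int) × Option Int :=
  if PySem.Str.startswith p.2 "a" then
    match acc.2 with
    | some s => (acc.1 ++ [(s, p.1)], some p.1)
    | none => (acc.1, some p.1)
  else acc

def get_alignment_block_indices_py (data : List String) : List (Int × Int) :=
  let st := (PySem.List.enumerate data).foldl pvStepA ([], none)
  match st.2 with
  | none => []
  | some s => st.1 ++ [(s, (data.length : Int) - 1)]

-- ===== PORT B =====
-- starts = [i for i, line in enumerate(data) if line.startswith("a")]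
def pvStarts (data : List String) : List Int :=
  (PySem.List.enumerate data).filterMap
    (fun p => if PySem.Str.startswith p.2 "a" then some p.1 else none)

def get_alignment_block_indices_py_alt (data : List String) : List (Int × Int) :=
  match pvStarts data with
  | [] => []
  | s :: rest => ((s :: rest).zip rest) ++ [((s :: rest).getLast (by simp), (data.length : Int) - 1)]

-- ===== PRECONDITION & SPEC =====
def Spec_get_alignment_block_indices_py (data : List String) (out : List (Int × Int)) : Prop := out = get_alignment_block_indices_py_alt data
instance (data : List String) (out : List (Int × Int)) : Decidable (Spec_get_alignment_block_indices_py data out) := by unfold Spec_get_alignment_block_indices_py; infer_instance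

-- ===== CLAIM (what is proved, stated in full; the proofs are below) =====
def Claim_equal_get_alignment_block_indices_py : Prop := ∀ (data : List String), Dom_get_alignment_block_indices_py data → Spec_get_alignment_block_indices_py data (get_alignment_block_indices_py data)

-- ===== LEMMAS AND PROOFS =====

-- starts of a generic enumerated list
def pvS (l : List (Int × String)) : List Int :=
  l.filterMap (fun p => if PySem.Str.startswith p.2 "a" then some p.1 else none)

-- loop invariant, state with a current start
theorem pvFold_some (l : List (Int × String)) : ∀ (bs : List (Int × Int)) (s : Int),
    l.foldl pvStepA (bs, some s) =
      (bs ++ (s :: pvS l).zip (pvS l), some ((s :: pvS l).getLast (by simp))) := by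
  induction l with
  | nil => intro bs s; simp [pvS]
  | cons p t ih =>
    intro bs s
    by_cases h : PySem.Str.startswith p.2 "a" = true
    · simp only [List.foldl_cons, pvStepA, h, if_pos, pvS, List.filterMap_cons]
      rw [ih]
      simp [pvS, List.getLast_cons]
    · simp only [List.foldl_cons, pvStepA, h, if_neg, pvS, List.filterMap_cons]
      simp only [if_neg, Bool.false_eq_true, not_false_iff]
      rw [ih]
      simp [pvS]

-- loop invariant, state with no start yet
theorem pvFold_none (l : List (Int × String)) (bs : List (Int × Int)) :
    l.foldl pvStepA (bs, none) =
      (match pvS l with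
       | [] => (bs, none)
       | s :: rest => (bs ++ (s :: rest).zip rest, some ((s :: rest).getLast (by simp)))) := by
  induction l generalizing bs with
  | nil => simp [pvS]
  | cons p t ih =>
    by_cases h : PySem.Str.startswith p.2 "a" = true
    · have h' : PySem.Chars.startswith p.2.toList ['a'] = true := by simpa using h
      simp only [List.foldl_cons, pvStepA, h, if_pos]
      rw [pvFold_some]
      simp [pvS, List.filterMap_cons, h']
    · have h' : ¬ PySem.Chars.startswith p.2.toList ['a'] = true := by simpa using h
      simp only [List.foldl_cons, pvStepA, h]
      simp only [Bool.false_eq_true, if_neg, not_false_iff]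
      rw [ih]
      simp [pvS, List.filterMap_cons, h']

-- ===== VERDICT (by name: the statement is the Claim_ definition above) =====
theorem get_alignment_block_indices_py_spec : Claim_equal_get_alignment_block_indices_py := by
  intro data _
  unfold Spec_get_alignment_block_indices_py get_alignment_block_indices_py get_alignment_block_indices_py_alt
  have h := pvFold_none (PySem.List.enumerate data) []
  have hs : pvStarts data = pvS (PySem.List.enumerate data) := rfl
  rw [hs]
  cases hS : pvS (PySem.List.enumerate data) with
  | nil => simp only [h, hS]
  | cons s rest =>
    simp only [h, hS]
    simp
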